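-- pv_equiv track=rewrite | github.com/fajarkarim/learn-python-data | find_bigrams/main.py | find_bigrams
-- ===== SOURCE A (Python) =====
-- def find_bigrams(sentence):
--
--     def format_word(word):
--         return word.strip().lower()
--
--     bigrams = []
--     words = sentence.split(' ')
--     for i in range(len(words) - 1):
--         bigramsItem = (format_word(words[i]), format_word(words[i+1].strip()))
--         bigrams.append(bigramsItem)
--
--     return bigrams
-- ===== SOURCE B (Python) =====
-- def find_bigrams(sentence):
--     bigrams = []
--     prev = None
--     chars = []
--     for ch in sentence:
--         if ch == ' ':
--             word = ''.join(chars).strip().lower()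
--             if prev is not None:
--                 bigrams.append((prev, word))
--             prev = word
--             chars = []
--         else:
--             chars.append(ch)
--     word = ''.join(chars).strip().lower()
--     if prev is not None:
--         bigrams.append((prev, word))
--     return bigrams
-- ===== Notes on version B (the rewrite author's own statement) =====
-- stated objective: alternative
-- what changed: Replaces split-then-index (build a word list, then loop over indices re-formatting both words of each pair) with a single character-level streaming scan of the sentence that accumulates the current word's characters and, at each space and at the end, emits a bigram with the previously formatted word; no word list or indexing is ever built.
import Mathlib
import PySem

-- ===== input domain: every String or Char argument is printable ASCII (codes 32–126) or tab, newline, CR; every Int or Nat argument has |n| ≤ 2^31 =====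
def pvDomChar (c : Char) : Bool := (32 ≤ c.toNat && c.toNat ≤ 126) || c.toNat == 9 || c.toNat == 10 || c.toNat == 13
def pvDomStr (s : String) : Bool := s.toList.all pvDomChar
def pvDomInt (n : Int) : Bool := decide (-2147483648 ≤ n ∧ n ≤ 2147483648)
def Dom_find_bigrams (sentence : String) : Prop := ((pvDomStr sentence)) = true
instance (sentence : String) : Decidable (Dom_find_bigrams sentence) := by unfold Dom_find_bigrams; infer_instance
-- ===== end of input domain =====

-- B replaces A's split-then-index-loop with a single character-level streaming scan that emits a
-- bigram each time a word is completed; objective: alternative algorithm, same cost.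

-- ===== PORT A =====
-- format_word(word) = word.strip().lower()
def pvFormatWord (word : String) : String :=
  PySem.Str.lower (PySem.Str.strip word)

-- literal port of A: words = sentence.split(' '); for i in range(len(words)-1):
--   bigrams.append((format_word(words[i]), format_word(words[i+1].strip())))
-- words[i]/words[i+1] are always in range on this loop, so pyGetD is exact here.
def find_bigrams (sentence : String) : List (String × String) :=
  let words : List String := (PySem.Str.split? sentence " ").getD []
  (PySem.List.pyRange 0 ((words.length : Int) - 1) 1).foldl
    (fun bigrams i =>
      bigrams ++ [(pvFormatWord (PySem.List.pyGetD words i ""),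
                   pvFormatWord (PySem.Str.strip (PySem.List.pyGetD words (i + 1) "")))])
    []

-- ===== PORT B =====
-- literal port of Source B: one pass over the characters; state = (bigrams, prev, chars);
-- on ' ' the current word is closed (''.join(chars).strip().lower()), paired with prev if any;
-- after the loop the final word is closed the same way.  ''.join(chars) = String.ofList chars.
def find_bigrams_alt (sentence : String) : List (String × String) :=
  let step := fun (st : List (String × String) × Option String × List Char) (ch : Char) =>
    if ch = ' ' then
      let word := PySem.Str.lower (PySem.Str.strip (String.ofList st.2.2))
      (match st.2.1 with
       | some p => st.1 ++ [(p, word)]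
       | none => st.1, some word, ([] : List Char))
    else
      (st.1, st.2.1, st.2.2 ++ [ch])
  let st := sentence.toList.foldl step ([], none, [])
  let word := PySem.Str.lower (PySem.Str.strip (String.ofList st.2.2))
  match st.2.1 with
  | some p => st.1 ++ [(p, word)]
  | none => st.1

-- ===== PRECONDITION & SPEC =====
def Spec_find_bigrams (sentence : String) (out : List (String × String)) : Prop := out = find_bigrams_alt sentence
instance (sentence : String) (out : List (String × String)) : Decidable (Spec_find_bigrams sentence out) := by unfold Spec_find_bigrams; infer_instance

-- ===== CLAIM (what is proved, stated in full; the proofs are below) =====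
def Claim_equal_find_bigrams : Prop := ∀ (sentence : String), Dom_find_bigrams sentence → Spec_find_bigrams sentence (find_bigrams sentence)

-- ===== LEMMAS AND PROOFS =====

-- reference splitter: split a char list on every single space (Python's s.split(' '))
def pvSplitSp : List Char → List (List Char)
  | [] => [[]]
  | c :: rest => if c = ' ' then [] :: pvSplitSp rest else
      match pvSplitSp rest with
      | [] => [[c]]
      | w :: ws => (c :: w) :: ws

theorem pvSplitSp_ne_nil (l : List Char) : pvSplitSp l ≠ [] := by
  cases l with
  | nil => simp [pvSplitSp]
  | cons c rest =>
    simp only [pvSplitSp]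
    split
    · simp
    · split <;> simp

-- prepend to the first word
def pvConsHead (pre : List Char) : List (List Char) → List (List Char)
  | [] => [pre]
  | w :: ws => (pre ++ w) :: ws

theorem pvConsHead_nil (ws : List (List Char)) (h : ws ≠ []) : pvConsHead [] ws = ws := by
  cases ws with
  | nil => exact absurd rfl h
  | cons w ws' => simp [pvConsHead]

-- PySem's fuel-based splitOn.go on sep = [' '] computes pvSplitSp
theorem pv_go_eq (fuel : Nat) (l cur : List Char) (acc : List (List Char))
    (h : l.length < fuel) :
    PySem.Chars.splitOn.go [' '] fuel l cur acc
      = acc.reverse ++ pvConsHead cur.reverse (pvSplitSp l) := by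
  induction fuel generalizing l cur acc with
  | zero => omega
  | succ fuel ih =>
    cases l with
    | nil =>
      simp [PySem.Chars.splitOn.go, pvSplitSp, pvConsHead]
    | cons c rest =>
      rw [PySem.Chars.splitOn.go]
      by_cases hc : c = ' '
      · subst hc
        have hpre : ([' '] : List Char).isPrefixOf (' ' :: rest) = true := by
          simp [List.isPrefixOf]
        simp only [hpre, if_pos, List.drop_succ_cons, List.length_nil, List.drop_zero,
          List.length_cons] at *
        rw [ih rest [] (cur.reverse :: acc) (by simpa using Nat.lt_of_succ_lt_succ h)]
        obtain ⟨w, ws, hsp⟩ := List.exists_cons_of_ne_nil (pvSplitSp_ne_nil rest)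
        simp [pvSplitSp, hsp, pvConsHead]
      · have hpre : ([' '] : List Char).isPrefixOf (c :: rest) = false := by
          simp [List.isPrefixOf]
          intro hcc; exact hc hcc.symm
        simp only [hpre, Bool.false_eq_true, if_false]
        rw [ih rest (c :: cur) acc (by simp at h ⊢; omega)]
        simp only [pvSplitSp, if_neg hc, List.reverse_cons]
        cases hsp : pvSplitSp rest with
        | nil => exact absurd hsp (pvSplitSp_ne_nil rest)
        | cons w ws => simp [pvConsHead]

theorem pv_splitOn_space (l : List Char) :
    PySem.Chars.splitOn l [' '] = pvSplitSp l := by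
  unfold PySem.Chars.splitOn
  rw [pv_go_eq l.length.succ l [] [] (Nat.lt_succ_self _)]
  simp [pvConsHead_nil _ (pvSplitSp_ne_nil l)]

-- B's formatter on char lists
def pvFmt (cs : List Char) : String := PySem.Str.lower (PySem.Str.strip (String.ofList cs))

-- the linking process: consume formatted words left to right, pairing each with the previous one
def pvChain (bg : List (String × String)) (prev : Option String) : List (List Char) → List (String × String)
  | [] => bg
  | w :: ws =>
      pvChain (match prev with
               | some p => bg ++ [(p, pvFmt w)]
               | none => bg) (some (pvFmt w)) ws

-- B's scan, started at any state, computes pvChain over the words of the remaining text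
theorem pv_scan_eq_chain (cs : List Char) (bg : List (String × String))
    (prev : Option String) (cur : List Char) :
    (let st := cs.foldl (fun (st : List (String × String) × Option String × List Char) ch =>
        if ch = ' ' then
          (match st.2.1 with
           | some p => st.1 ++ [(p, PySem.Str.lower (PySem.Str.strip (String.ofList st.2.2)))]
           | none => st.1, some (PySem.Str.lower (PySem.Str.strip (String.ofList st.2.2))), ([] : List Char))
        else (st.1, st.2.1, st.2.2 ++ [ch])) (bg, prev, cur);
     match st.2.1 with
     | some p => st.1 ++ [(p, PySem.Str.lower (PySem.Str.strip (String.ofList st.2.2)))]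
     | none => st.1)
      = pvChain bg prev (pvConsHead cur (pvSplitSp cs)) := by
  induction cs generalizing bg prev cur with
  | nil =>
    cases prev <;> simp [pvSplitSp, pvConsHead, pvChain, pvFmt]
  | cons c rest ih =>
    by_cases hc : c = ' '
    · subst hc
      simp only [List.foldl_cons, if_pos]
      rw [ih]
      obtain ⟨w, ws, hsp⟩ := List.exists_cons_of_ne_nil (pvSplitSp_ne_nil rest)
      cases prev <;> simp [pvSplitSp, hsp, pvConsHead, pvChain, pvFmt]
    · simp only [List.foldl_cons, if_neg hc]
      rw [ih]
      simp only [pvSplitSp, if_neg hc]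
      cases hsp : pvSplitSp rest with
      | nil => exact absurd hsp (pvSplitSp_ne_nil rest)
      | cons w ws => simp [pvConsHead]

-- pvChain with a known previous word is the zip of the formatted words shifted by one
theorem pv_chain_some (ws : List (List Char)) (bg : List (String × String)) (p : String) :
    pvChain bg (some p) ws = bg ++ (p :: ws.map pvFmt).zip (ws.map pvFmt) := by
  induction ws generalizing bg p with
  | nil => simp [pvChain]
  | cons w ws ih =>
    simp only [pvChain, List.map_cons, List.zip_cons_cons]
    rw [ih]
    simp

theorem pv_chain_none (ws : List (List Char)) :
    pvChain [] none ws = (ws.map pvFmt).zip ((ws.map pvFmt).drop 1) := by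
  cases ws with
  | nil => simp [pvChain]
  | cons w ws =>
    simp only [pvChain]
    rw [pv_chain_some]
    simp

-- a prefix of a list unchanged by dropWhile is itself unchanged by dropWhile
theorem pv_dropWhile_prefix {α : Type} (p : α → Bool) (xs t : List α)
    (hxs : xs.dropWhile p = xs) (h : t <+: xs) : t.dropWhile p = t := by
  cases t with
  | nil => simp
  | cons a t' =>
    obtain ⟨s, hs⟩ := h
    subst hs
    rw [List.cons_append, List.dropWhile_cons] at hxs
    split at hxs
    · exfalso
      have h1 := List.length_dropWhile_le p (t' ++ s)
      have h2 := congrArg List.length hxs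
      simp [List.length_append] at h1 h2
      omega
    · rename_i hpa
      rw [List.dropWhile_cons, if_neg hpa]

-- Chars.strip is idempotent
theorem pv_strip_strip (l : List Char) :
    PySem.Chars.strip (PySem.Chars.strip l) = PySem.Chars.strip l := by
  unfold PySem.Chars.strip PySem.Chars.rstrip PySem.Chars.lstrip
  set p := PySem.Chars.isspace
  set m := l.dropWhile p with hm
  have hmfix : m.dropWhile p = m := List.dropWhile_idempotent p l
  have hpre : ((m.reverse.dropWhile p).reverse : List Char) <+: m := by
    have hsuf : m.reverse.dropWhile p <:+ m.reverse := List.dropWhile_suffix p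
    have := List.reverse_prefix.mpr (by simpa using hsuf)
    simpa using this
  have hl : ((m.reverse.dropWhile p).reverse).dropWhile p = (m.reverse.dropWhile p).reverse :=
    pv_dropWhile_prefix p m _ hmfix hpre
  rw [hl, List.reverse_reverse, List.dropWhile_idempotent]

theorem pv_str_strip_strip (w : String) :
    PySem.Str.strip (PySem.Str.strip w) = PySem.Str.strip w := by
  have h : (PySem.Str.strip (PySem.Str.strip w)).toList = (PySem.Str.strip w).toList := by
    simp [PySem.Str.toList_strip, pv_strip_strip]
  exact String.toList_inj.mp h

theorem pv_format_strip (w : String) :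
    pvFormatWord (PySem.Str.strip w) = pvFormatWord w := by
  unfold pvFormatWord
  rw [pv_str_strip_strip]

-- A's index loop equals the zip of the formatted word list with its tail
theorem pv_loop_eq_zip (f : String → String) (ws : List String) :
    (PySem.List.pyRange 0 ((ws.length : Int) - 1) 1).foldl
      (fun acc i => acc ++ [(f (PySem.List.pyGetD ws i ""), f (PySem.List.pyGetD ws (i + 1) ""))])
      []
    = (ws.map f).zip ((ws.map f).drop 1) := by
  rw [PySem.List.foldl_append_singleton_eq_map]
  rw [PySem.List.pyRange_one]
  simp only [sub_zero, List.map_map, List.nil_append]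
  apply List.ext_getElem
  · simp [List.length_zip]
  · intro k hk1 hk2
    simp [List.length_zip] at hk2
    have hk' : k < ws.length := by omega
    have hk1' : k + 1 < ws.length := by omega
    simp only [List.getElem_map, List.getElem_range, List.getElem_zip, List.getElem_drop,
      Function.comp_apply, zero_add]
    have e1 : PySem.List.pyGetD ws ((k : Int)) "" = ws[k] := by
      rw [PySem.List.pyGetD_natCast]
      exact List.getD_eq_getElem ws "" hk'
    have e2 : PySem.List.pyGetD ws ((k : Int) + 1) "" = ws[k + 1] := by
      have h : ((k : Int) + 1) = ((k + 1 : Nat) : Int) := by push_cast; ring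
      rw [h, PySem.List.pyGetD_natCast]
      exact List.getD_eq_getElem ws "" hk1'
    rw [e1, e2]
    have h12 : ws[1 + k] = ws[k + 1] := by simp [Nat.add_comm]
    rw [h12]

-- the words A sees are pvSplitSp of the characters
theorem pv_words_eq (sentence : String) :
    (PySem.Str.split? sentence " ").getD []
      = (pvSplitSp sentence.toList).map String.ofList := by
  simp only [PySem.Str.split?, PySem.Chars.split?]
  have h : (" " : String).toList = [' '] := rfl
  rw [h]
  simp [pv_splitOn_space]

-- ===== VERDICT (by name: the statement is the Claim_ definition above) =====
theorem find_bigrams_spec : Claim_equal_find_bigrams := by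
  intro sentence _
  unfold Spec_find_bigrams
  -- A side: loop → zip of formatted words
  simp only [find_bigrams]
  rw [pv_words_eq]
  set sp : List (List Char) := pvSplitSp sentence.toList with hsp
  have hbody :
      (fun (acc : List (String × String)) (i : Int) =>
        acc ++ [(pvFormatWord (PySem.List.pyGetD (sp.map String.ofList) i ""),
                 pvFormatWord (PySem.Str.strip (PySem.List.pyGetD (sp.map String.ofList) (i + 1) "")))])
      = (fun acc i =>
        acc ++ [(pvFormatWord (PySem.List.pyGetD (sp.map String.ofList) i ""),
                 pvFormatWord (PySem.List.pyGetD (sp.map String.ofList) (i + 1) ""))]) := by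
    funext acc i
    rw [pv_format_strip]
  rw [hbody, pv_loop_eq_zip pvFormatWord (sp.map String.ofList)]
  -- B side: scan → pvChain → the same zip
  have hB := pv_scan_eq_chain sentence.toList [] none []
  simp only [find_bigrams_alt]
  rw [hB, pvConsHead_nil _ (pvSplitSp_ne_nil _), ← hsp, pv_chain_none]
  have hmap : sp.map pvFmt = (sp.map String.ofList).map pvFormatWord := by
    simp [pvFmt, pvFormatWord, Function.comp]
  rw [hmap]
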